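-- pv_equiv track=rewrite | github.com/ssjang1/codetree-TILs | 241120/2개 이상의 알파벳/more-than-one-alphabet.py | check
-- ===== SOURCE A (Python) =====
-- def check(s):
--     a = set()
--     for i in s:
--         if i not in a:
--             a.add(i)
--
--     if len(a)>=2:
--         return True
--     else:
--         return False
-- ===== SOURCE B (Python) =====
-- def check(s):
--     return bool(s) and any(c != s[0] for c in s)
-- ===== Notes on version B (the rewrite author's own statement) =====
-- stated objective: simpler
-- what changed: B compares each character to the first character and short-circuits on the first mismatch instead of building a set of distinct characters and testing its size.
import Mathlib
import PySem

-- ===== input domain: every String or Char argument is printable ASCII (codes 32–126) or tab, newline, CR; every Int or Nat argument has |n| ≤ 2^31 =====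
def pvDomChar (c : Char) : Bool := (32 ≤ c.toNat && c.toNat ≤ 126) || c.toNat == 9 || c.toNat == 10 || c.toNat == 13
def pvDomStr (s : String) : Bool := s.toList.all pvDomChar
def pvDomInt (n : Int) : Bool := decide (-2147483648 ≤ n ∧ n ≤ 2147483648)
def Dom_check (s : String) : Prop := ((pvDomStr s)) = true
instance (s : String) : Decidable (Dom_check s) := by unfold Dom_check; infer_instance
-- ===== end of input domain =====

-- B compares each character against the first and short-circuits, instead of building a set of distinct characters and measuring its size (simpler; same return value).

-- ===== PORT A =====
-- a = set(); for i in s: if i not in a: a.add(i); return len(a) >= 2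
def check (s : String) : Bool :=
  let a : PySem.Set Char :=
    s.toList.foldl (fun a i => if ¬ (PySem.Set.contains a i) then PySem.Set.add a i else a) PySem.Set.empty
  if 2 ≤ PySem.Set.len a then true else false

-- ===== PORT B =====
-- return bool(s) and any(c != s[0] for c in s)
def check_alt (s : String) : Bool :=
  match s.toList with
  | [] => false
  | h :: t => (h :: t).any (fun c => c != h)

-- ===== PRECONDITION & SPEC =====
def Spec_check (s : String) (out : Bool) : Prop := out = check_alt s
instance (s : String) (out : Bool) : Decidable (Spec_check s out) := by unfold Spec_check; infer_instance

-- ===== CLAIM (what is proved, stated in full; the proofs are below) =====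
def Claim_equal_check : Prop := ∀ (s : String), Dom_check s → Spec_check s (check s)

-- ===== LEMMAS AND PROOFS =====

-- the step of A's loop is exactly Set.add
theorem step_eq_add (a : PySem.Set Char) (i : Char) :
    (if ¬ (PySem.Set.contains a i) then PySem.Set.add a i else a) = PySem.Set.add a i := by
  unfold PySem.Set.add
  by_cases h : PySem.Set.contains a i
  · simp [h]
  · simp [h]

theorem foldl_add_length_mono (t : List Char) (a : PySem.Set Char) :
    a.length ≤ (t.foldl PySem.Set.add a).length := by
  induction t generalizing a with
  | nil => simp
  | cons x t ih =>
      refine le_trans ?_ (ih (PySem.Set.add a x))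
      simp [PySem.Set.add]
      split <;> simp

theorem foldl_add_two_le (t : List Char) (a : PySem.Set Char) (ha : a ≠ []) :
    2 ≤ (t.foldl PySem.Set.add a).length ↔ 2 ≤ a.length ∨ ∃ x ∈ t, ¬ x ∈ a := by
  induction t generalizing a with
  | nil => simp
  | cons x t ih =>
      by_cases hx : x ∈ a
      · have hc : PySem.Set.contains a x = true := by
          simp [PySem.Set.contains, hx]
        rw [List.foldl_cons, PySem.Set.add, if_pos hc, ih a ha]
        constructor
        · rintro (h | ⟨y, hy, hny⟩)
          · exact Or.inl h
          · exact Or.inr ⟨y, List.mem_cons_of_mem _ hy, hny⟩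
        · rintro (h | ⟨y, hy, hny⟩)
          · exact Or.inl h
          · rcases List.mem_cons.mp hy with rfl | hy
            · exact absurd hx hny
            · exact Or.inr ⟨y, hy, hny⟩
      · have hc : PySem.Set.contains a x = false := by
          simp [PySem.Set.contains, hx]
        rw [List.foldl_cons, PySem.Set.add, if_neg (by simpa [PySem.Set.contains] using hx)]
        have h1 : 1 ≤ a.length := List.length_pos_of_ne_nil ha
        have h2 : 2 ≤ (a ++ [x]).length := by simp; omega
        constructor
        · intro _; exact Or.inr ⟨x, List.mem_cons_self .., hx⟩
        · intro _
          exact le_trans h2 (foldl_add_length_mono t (a ++ [x]))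

-- ===== VERDICT (by name: the statement is the Claim_ definition above) =====
theorem check_spec : Claim_equal_check := by
  intro s _
  unfold Spec_check check check_alt
  simp only [step_eq_add]
  cases hs : s.toList with
  | nil => simp [PySem.Set.len, PySem.Set.empty]
  | cons h t =>
      have hinit : PySem.Set.add (PySem.Set.empty) h = [h] := by
        simp [PySem.Set.add, PySem.Set.contains, PySem.Set.empty]
      rw [List.foldl_cons, hinit]
      have key := foldl_add_two_le t [h] (by simp)
      simp only [List.mem_singleton] at key
      have hiff : (2 ≤ PySem.Set.len (t.foldl PySem.Set.add [h])) ↔ ∃ x ∈ t, x ≠ h := by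
        unfold PySem.Set.len
        rw [show ((2:Int) ≤ (List.length (t.foldl PySem.Set.add [h]) : Int)) ↔
              2 ≤ List.length (t.foldl PySem.Set.add [h]) by exact_mod_cast Iff.rfl]
        rw [key]; simp
      rw [show (match h :: t with
            | [] => false
            | h :: t => (h :: t).any (fun c => c != h)) = (t.any (fun c => c != h)) by simp]
      by_cases hd : ∃ x ∈ t, x ≠ h
      · rw [if_pos (hiff.mpr hd)]
        symm; rw [List.any_eq_true]
        obtain ⟨x, hx, hne⟩ := hd
        exact ⟨x, hx, by simpa using hne⟩
      · rw [if_neg (fun hc => hd (hiff.mp hc))]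
        symm; rw [List.any_eq_false]
        intro x hx
        simp only [bne_iff_ne, ne_eq, not_not]
        by_contra hne
        exact hd ⟨x, hx, hne⟩
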